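-- pv_equiv track=rewrite | github.com/chillancezen/fortimanager-ansible-generator | generate.py | canonicalize_text
-- ===== SOURCE A (Python) =====
-- def canonicalize_text(raw_text):
--     delimiters = ['<br/><b>', '<li>']
--     stripped_words = ['</b>', '<b>', '</li>', '<ul>', '</ul>']
--     utimate_lst = [raw_text]
--     for delimiter in delimiters:
--         finer_lst = list()
--         for item in utimate_lst:
--             finer_items = item.split(delimiter)
--             for finer_item in finer_items:
--                 finer_lst.append(finer_item)
--         utimate_lst = finer_lst
--     ret_lst = list()
--     for item in utimate_lst:
--         stripped_data = item
--         for stripped_chars in stripped_words: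
--             stripped_data = stripped_data.replace(stripped_chars, '')
--         stripped_data = stripped_data.rstrip(' ').rstrip('-').rstrip('-')
--         stripped_data = stripped_data.replace('\'', '')
--         ret_lst.append('\'' + stripped_data + '\'')
--     return ret_lst
-- ===== SOURCE B (Python) =====
-- def _clean(piece):
--     for word in ('</b>', '<b>', '</li>', '<ul>', '</ul>'):
--         piece = piece.replace(word, '')
--     piece = piece.rstrip(' ').rstrip('-')
--     return "'" + piece.replace("'", '') + "'"
--
-- def canonicalize_text(raw_text):
--     # single left-to-right scan splitting on either delimiter in one pass
--     delimiters = ('<br/><b>', '<li>')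
--     pieces = []
--     buf = []
--     i = 0
--     n = len(raw_text)
--     while i < n:
--         for d in delimiters:
--             if raw_text.startswith(d, i):
--                 pieces.append(''.join(buf))
--                 buf = []
--                 i += len(d)
--                 break
--         else:
--             buf.append(raw_text[i])
--             i += 1
--     pieces.append(''.join(buf))
--     return [_clean(p) for p in pieces]
-- ===== Notes on version B (the rewrite author's own statement) =====
-- stated objective: alternative
-- what changed: A splits the text in two sequential passes (first on '<br/><b>' over the whole text, then on '<li>' over every piece, flattening); B makes a single left-to-right scan that splits on whichever delimiter matches at the current position, then cleans each piece once (with a single rstrip('-'), since A's second rstrip('-') is a no-op).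
import Mathlib
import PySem

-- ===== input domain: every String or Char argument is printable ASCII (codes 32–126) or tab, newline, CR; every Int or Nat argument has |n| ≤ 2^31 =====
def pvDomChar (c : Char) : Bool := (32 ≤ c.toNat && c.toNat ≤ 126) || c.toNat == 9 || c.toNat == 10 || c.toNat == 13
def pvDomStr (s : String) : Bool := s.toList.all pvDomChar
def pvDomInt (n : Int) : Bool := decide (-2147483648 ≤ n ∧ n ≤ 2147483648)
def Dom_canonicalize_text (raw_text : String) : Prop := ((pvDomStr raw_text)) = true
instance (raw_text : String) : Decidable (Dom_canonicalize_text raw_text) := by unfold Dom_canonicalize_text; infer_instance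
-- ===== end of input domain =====

-- B replaces A's two sequential split passes (split on '<br/><b>', then split every piece
-- on '<li>') by a single left-to-right scan that splits on whichever delimiter matches at
-- the current position (objective: alternative; same per-piece cleanup, written once).

-- exact port of Python str.rstrip(chars) (right-strip only; PySem has stripChars for both
-- sides but no right-only form) — shared by both ports as a primitive stand-in
def pvRstrip (cs : List Char) (chars : List Char) : List Char :=
  (cs.reverse.dropWhile (fun c => chars.contains c)).reverse

-- ===== PORT A =====
def canonicalize_text (raw_text : String) : List String :=
  let delimiters : List (List Char) := ["<br/><b>".toList, "<li>".toList]
  let stripped_words : List (List Char) := ["</b>".toList, "<b>".toList, "</li>".toList, "<ul>".toList, "</ul>".toList]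
  let utimate_lst : List (List Char) :=
    delimiters.foldl (fun utimate_lst delimiter =>
      utimate_lst.foldl (fun finer_lst item =>
        (PySem.Chars.splitOn item delimiter).foldl (fun fl fi => fl ++ [fi]) finer_lst) [])
      [raw_text.toList]
  let ret_lst : List (List Char) :=
    utimate_lst.foldl (fun ret_lst item =>
      let stripped_data := stripped_words.foldl (fun sd w => PySem.Chars.replace sd w []) item
      let stripped_data := pvRstrip (pvRstrip (pvRstrip stripped_data [' ']) ['-']) ['-']
      let stripped_data := PySem.Chars.replace stripped_data ['\''] []
      ret_lst ++ [['\''] ++ stripped_data ++ ['\'']]) []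
  ret_lst.map String.ofList

-- ===== PORT B =====
def pvCleanB (piece : List Char) : List Char :=
  let p := (["</b>".toList, "<b>".toList, "</li>".toList, "<ul>".toList, "</ul>".toList]).foldl
             (fun p w => PySem.Chars.replace p w []) piece
  let p := pvRstrip (pvRstrip p [' ']) ['-']
  ['\''] ++ PySem.Chars.replace p ['\''] [] ++ ['\'']

def pvScanB (l : List Char) (buf : List Char) (pieces : List (List Char)) : List (List Char) :=
  match l with
  | [] => pieces ++ [buf]
  | c :: rest =>
    if PySem.Chars.startswith (c :: rest) ("<br/><b>".toList) then
      pvScanB ((c :: rest).drop 8) [] (pieces ++ [buf])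
    else if PySem.Chars.startswith (c :: rest) ("<li>".toList) then
      pvScanB ((c :: rest).drop 4) [] (pieces ++ [buf])
    else
      pvScanB rest (buf ++ [c]) pieces
termination_by l.length
decreasing_by all_goals simp

def canonicalize_text_alt (raw_text : String) : List String :=
  (pvScanB raw_text.toList [] []).map (fun p => String.ofList (pvCleanB p))

-- ===== PRECONDITION & SPEC =====
def Spec_canonicalize_text (raw_text : String) (out : List String) : Prop := out = canonicalize_text_alt raw_text
instance (raw_text : String) (out : List String) : Decidable (Spec_canonicalize_text raw_text out) := by unfold Spec_canonicalize_text; infer_instance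

-- ===== CLAIM (what is proved, stated in full; the proofs are below) =====
def Claim_equal_canonicalize_text : Prop := ∀ (raw_text : String), Dom_canonicalize_text raw_text → Spec_canonicalize_text raw_text (canonicalize_text raw_text)

-- ===== LEMMAS AND PROOFS =====

def pvD1 : List Char := ['<', 'b', 'r', '/', '>', '<', 'b', '>']
def pvD2 : List Char := ['<', 'l', 'i', '>']

theorem pvD1_eq : "<br/><b>".toList = pvD1 := by decide
theorem pvD2_eq : "<li>".toList = pvD2 := by decide

-- map over the head piece only
def pvMapHd (f : List Char → List Char) : List (List Char) → List (List Char)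
  | [] => []
  | q :: qs => f q :: qs

theorem pvMapHd_id (x : List (List Char)) : pvMapHd (fun q => q) x = x := by
  cases x <;> simp [pvMapHd]

theorem pvMapHd_comp (f g : List Char → List Char) (x : List (List Char)) :
    pvMapHd f (pvMapHd g x) = pvMapHd (fun q => f (g q)) x := by
  cases x <;> simp [pvMapHd]

-- clean (fuel-free) reformulation of PySem.Chars.splitOn for a nonempty separator
def pvSp (sep : List Char) : List Char → List (List Char)
  | [] => [[]]
  | c :: rest =>
    if sep <+: (c :: rest) ∧ sep ≠ [] then [] :: pvSp sep ((c :: rest).drop sep.length)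
    else pvMapHd (fun q => c :: q) (pvSp sep rest)
termination_by l => l.length
decreasing_by
  · rename_i h
    have := List.length_pos_of_ne_nil h.2
    simp; omega
  · simp

theorem pvSp_nil (sep : List Char) : pvSp sep [] = [[]] := by
  rw [pvSp.eq_def]

theorem pvSp_pos (sep : List Char) (c : Char) (rest : List Char)
    (h : sep <+: (c :: rest)) (hs : sep ≠ []) :
    pvSp sep (c :: rest) = [] :: pvSp sep ((c :: rest).drop sep.length) := by
  rw [pvSp.eq_def]; simp only []
  rw [if_pos ⟨h, hs⟩]

theorem pvSp_neg (sep : List Char) (c : Char) (rest : List Char)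
    (h : ¬ (sep <+: (c :: rest) ∧ sep ≠ [])) :
    pvSp sep (c :: rest) = pvMapHd (fun q => c :: q) (pvSp sep rest) := by
  rw [pvSp.eq_def]; simp only []
  rw [if_neg h]

theorem pvSp_neg' (sep : List Char) (c : Char) (rest : List Char)
    (h : ¬ sep <+: (c :: rest)) :
    pvSp sep (c :: rest) = pvMapHd (fun q => c :: q) (pvSp sep rest) :=
  pvSp_neg sep c rest (fun hc => h hc.1)

theorem pvD1_len : pvD1.length = 8 := rfl
theorem pvD2_len : pvD2.length = 4 := rfl

theorem pvSp_shape (sep l : List Char) : ∃ p ps, pvSp sep l = p :: ps ∧ p <+: l := by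
  fun_induction pvSp sep l with
  | case1 => exact ⟨[], [], rfl, List.nil_prefix⟩
  | case2 c rest h ih =>
      exact ⟨[], pvSp sep (List.drop sep.length (c :: rest)), rfl, List.nil_prefix⟩
  | case3 c rest h ih =>
      obtain ⟨p, ps, hps, hpre⟩ := ih
      refine ⟨c :: p, ps, ?_, List.cons_prefix_cons.mpr ⟨rfl, hpre⟩⟩
      rw [hps]
      rfl

theorem pvGo_eq (sep : List Char) (hs : sep ≠ []) :
    ∀ fuel l cur acc, l.length < fuel →
      PySem.Chars.splitOn.go sep fuel l cur acc =
        acc.reverse ++ pvMapHd (fun q => cur.reverse ++ q) (pvSp sep l) := by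
  intro fuel
  induction fuel with
  | zero => intro l cur acc h; omega
  | succ f ih =>
    intro l cur acc h
    cases l with
    | nil =>
      simp [PySem.Chars.splitOn.go, pvSp_nil, pvMapHd]
    | cons c rest =>
      have hsl : 0 < sep.length := List.length_pos_of_ne_nil hs
      by_cases hp : sep <+: (c :: rest)
      · have hb : sep.isPrefixOf (c :: rest) = true := List.isPrefixOf_iff_prefix.mpr hp
        have hlen : (List.drop sep.length (c :: rest)).length < f := by
          simp at h ⊢; omega
        rw [PySem.Chars.splitOn.go]
        rw [if_pos hb, ih _ _ _ hlen, pvSp_pos sep c rest hp hs]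
        obtain ⟨p, ps, hps, -⟩ := pvSp_shape sep (List.drop sep.length (c :: rest))
        rw [hps]; simp [pvMapHd]
      · have hb : ¬ sep.isPrefixOf (c :: rest) = true := fun hb =>
          hp (List.isPrefixOf_iff_prefix.mp hb)
        have hlen : rest.length < f := by simp at h; omega
        rw [PySem.Chars.splitOn.go]
        rw [if_neg hb, ih _ _ _ hlen, pvSp_neg' sep c rest hp]
        obtain ⟨p, ps, hps, -⟩ := pvSp_shape sep rest
        rw [hps]; simp [pvMapHd]

theorem pvSplitOn_d1 (l : List Char) : PySem.Chars.splitOn l ("<br/><b>".toList) = pvSp pvD1 l := by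
  rw [PySem.Chars.splitOn, pvD1_eq, pvGo_eq pvD1 (by decide) (l.length + 1) l [] [] (by omega)]
  obtain ⟨p, ps, hps, -⟩ := pvSp_shape pvD1 l
  rw [hps]; simp [pvMapHd]

theorem pvSplitOn_d2 (l : List Char) : PySem.Chars.splitOn l ("<li>".toList) = pvSp pvD2 l := by
  rw [PySem.Chars.splitOn, pvD2_eq, pvGo_eq pvD2 (by decide) (l.length + 1) l [] [] (by omega)]
  obtain ⟨p, ps, hps, -⟩ := pvSp_shape pvD2 l
  rw [hps]; simp [pvMapHd]

-- two-delimiter single-pass splitter (proof-side twin of pvScanB's recursion)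
def pvMs : List Char → List (List Char)
  | [] => [[]]
  | c :: rest =>
    if pvD1 <+: (c :: rest) then [] :: pvMs ((c :: rest).drop 8)
    else if pvD2 <+: (c :: rest) then [] :: pvMs ((c :: rest).drop 4)
    else pvMapHd (fun q => c :: q) (pvMs rest)
termination_by l => l.length
decreasing_by all_goals simp

theorem pvMs_nil : pvMs [] = [[]] := by rw [pvMs.eq_def]

theorem pvMs_pos1 (c : Char) (rest : List Char) (h : pvD1 <+: (c :: rest)) :
    pvMs (c :: rest) = [] :: pvMs ((c :: rest).drop 8) := by
  rw [pvMs.eq_def]; simp only []; rw [if_pos h]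

theorem pvMs_pos2 (c : Char) (rest : List Char) (h1 : ¬ pvD1 <+: (c :: rest))
    (h2 : pvD2 <+: (c :: rest)) :
    pvMs (c :: rest) = [] :: pvMs ((c :: rest).drop 4) := by
  rw [pvMs.eq_def]; simp only []; rw [if_neg h1, if_pos h2]

theorem pvMs_neg (c : Char) (rest : List Char) (h1 : ¬ pvD1 <+: (c :: rest))
    (h2 : ¬ pvD2 <+: (c :: rest)) :
    pvMs (c :: rest) = pvMapHd (fun q => c :: q) (pvMs rest) := by
  rw [pvMs.eq_def]; simp only []; rw [if_neg h1, if_neg h2]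

theorem pvMs_eq_flatMap (l : List Char) :
    (pvSp pvD1 l).flatMap (pvSp pvD2) = pvMs l := by
  generalize hn : l.length = n
  induction n using Nat.strong_induction_on generalizing l with
  | _ n ih =>
  subst hn
  cases l with
  | nil => simp [pvSp_nil, pvMs_nil]
  | cons c rest =>
    by_cases h1 : pvD1 <+: (c :: rest)
    · rw [pvSp_pos pvD1 c rest h1 (by decide), pvMs_pos1 c rest h1]
      simp only [pvD1_len, List.flatMap_cons]
      rw [ih (List.drop 8 (c :: rest)).length (by simp) _ rfl]
      simp [pvSp_nil]
    · by_cases h2 : pvD2 <+: (c :: rest)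
      · obtain ⟨rest', hr⟩ := h2
        have hl : c :: rest = '<' :: 'l' :: 'i' :: '>' :: rest' := by rw [← hr]; rfl
        rw [hl] at h1 ⊢
        have hA : pvSp pvD1 ('<' :: 'l' :: 'i' :: '>' :: rest')
            = pvMapHd (fun q => '<' :: 'l' :: 'i' :: '>' :: q) (pvSp pvD1 rest') := by
          rw [pvSp_neg' pvD1 _ _ h1,
              pvSp_neg' pvD1 _ _ (by intro h; rcases List.cons_prefix_cons.mp h with ⟨h, -⟩; exact absurd h (by decide)),
              pvSp_neg' pvD1 _ _ (by intro h; rcases List.cons_prefix_cons.mp h with ⟨h, -⟩; exact absurd h (by decide)),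
              pvSp_neg' pvD1 _ _ (by intro h; rcases List.cons_prefix_cons.mp h with ⟨h, -⟩; exact absurd h (by decide))]
          simp [pvMapHd_comp]
        have hM : pvMs ('<' :: 'l' :: 'i' :: '>' :: rest') = [] :: pvMs rest' := by
          rw [pvMs_pos2 _ _ h1 ⟨rest', rfl⟩]; rfl
        obtain ⟨p, ps, hps, -⟩ := pvSp_shape pvD1 rest'
        have hpre2 : pvD2 <+: ('<' :: 'l' :: 'i' :: '>' :: p) := ⟨p, rfl⟩
        have hB : pvSp pvD2 ('<' :: 'l' :: 'i' :: '>' :: p) = [] :: pvSp pvD2 p := by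
          rw [pvSp_pos pvD2 '<' ('l' :: 'i' :: '>' :: p) hpre2 (by decide)]
          simp [pvD2_len]
        have hIH := ih rest'.length (by rw [hl]; simp only [List.length_cons]; omega) rest' rfl
        rw [hps] at hIH
        simp only [List.flatMap_cons] at hIH
        rw [hA, hM, hps]
        simp only [pvMapHd, List.flatMap_cons, hB]
        simp [hIH]
      · rw [pvSp_neg' pvD1 c rest h1, pvMs_neg c rest h1 h2]
        obtain ⟨p, ps, hps, hpre⟩ := pvSp_shape pvD1 rest
        have h2' : ¬ pvD2 <+: (c :: p) := fun hcp =>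
          h2 (hcp.trans (List.cons_prefix_cons.mpr ⟨rfl, hpre⟩))
        obtain ⟨q, qs, hqs, -⟩ := pvSp_shape pvD2 p
        have hIH := ih rest.length (by simp) rest rfl
        rw [hps] at hIH
        simp only [List.flatMap_cons] at hIH
        have hMr : pvMs rest = q :: (qs ++ List.flatMap (pvSp pvD2) ps) := by
          rw [← hIH, hqs]; rfl
        rw [hps, hMr]
        simp only [pvMapHd, List.flatMap_cons, pvSp_neg' pvD2 c p h2', hqs]
        rfl

theorem pvScanB_eq (l : List Char) : ∀ buf pieces,
    pvScanB l buf pieces = pieces ++ pvMapHd (fun q => buf ++ q) (pvMs l) := by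
  generalize hn : l.length = n
  induction n using Nat.strong_induction_on generalizing l with
  | _ n ih =>
  subst hn
  intro buf pieces
  cases l with
  | nil => simp [pvScanB, pvMs_nil, pvMapHd]
  | cons c rest =>
    by_cases h1 : pvD1 <+: (c :: rest)
    · have hb : PySem.Chars.startswith (c :: rest) ("<br/><b>".toList) = true :=
        (PySem.Chars.startswith_iff _ _).mpr (pvD1_eq ▸ h1)
      rw [pvScanB]
      rw [if_pos hb, ih (List.drop 8 (c :: rest)).length (by simp) _ rfl,
        pvMs_pos1 c rest h1]
      obtain hd : List.drop 8 (c :: rest) = List.drop 8 (c :: rest) := rfl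
      cases hms : pvMs (List.drop 8 (c :: rest)) <;>
        simp [pvMapHd]
    · by_cases h2 : pvD2 <+: (c :: rest)
      · have hb : ¬ PySem.Chars.startswith (c :: rest) ("<br/><b>".toList) = true := fun hb =>
          h1 (pvD1_eq ▸ (PySem.Chars.startswith_iff _ _).mp hb)
        have hb2 : PySem.Chars.startswith (c :: rest) ("<li>".toList) = true :=
          (PySem.Chars.startswith_iff _ _).mpr (pvD2_eq ▸ h2)
        rw [pvScanB]
        rw [if_neg hb, if_pos hb2, ih (List.drop 4 (c :: rest)).length (by simp) _ rfl,
          pvMs_pos2 c rest h1 h2]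
        cases hms : pvMs (List.drop 4 (c :: rest)) <;>
          simp [pvMapHd]
      · have hb : ¬ PySem.Chars.startswith (c :: rest) ("<br/><b>".toList) = true := fun hb =>
          h1 (pvD1_eq ▸ (PySem.Chars.startswith_iff _ _).mp hb)
        have hb2 : ¬ PySem.Chars.startswith (c :: rest) ("<li>".toList) = true := fun hb =>
          h2 (pvD2_eq ▸ (PySem.Chars.startswith_iff _ _).mp hb)
        rw [pvScanB]
        rw [if_neg hb, if_neg hb2, ih rest.length (by simp) _ rfl, pvMs_neg c rest h1 h2]
        cases hms : pvMs rest <;> simp [pvMapHd]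

theorem pvRstrip_idem (x chars : List Char) :
    pvRstrip (pvRstrip x chars) chars = pvRstrip x chars := by
  have dw : ∀ (p : Char → Bool) (l : List Char),
      List.dropWhile p (List.dropWhile p l) = List.dropWhile p l := by
    intro p l
    induction l with
    | nil => rfl
    | cons a t iht =>
      by_cases h : p a
      · simp [List.dropWhile, h, iht]
      · simp [List.dropWhile, h]
  simp [pvRstrip, dw]

theorem pvFlatMap_singleton (F : List Char → List Char) (X : List (List Char)) :
    X.flatMap (fun x => [F x]) = X.map F := by
  induction X with
  | nil => rfl
  | cons a t iht => simp [iht]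

-- ===== VERDICT (by name: the statement is the Claim_ definition above) =====
theorem canonicalize_text_spec : Claim_equal_canonicalize_text := by
  intro raw _
  show canonicalize_text raw = canonicalize_text_alt raw
  rw [canonicalize_text, canonicalize_text_alt]
  simp only [List.foldl_cons, List.foldl_nil, PySem.List.foldl_append_singleton,
    PySem.List.foldl_append_eq_flatMap, List.nil_append, List.flatMap_cons,
    List.flatMap_nil, List.append_nil, pvSplitOn_d1, pvSplitOn_d2]
  rw [pvScanB_eq raw.toList [] []]
  rw [show (pvSp pvD1 raw.toList).flatMap (pvSp pvD2) = pvMs raw.toList from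
    pvMs_eq_flatMap raw.toList]
  simp only [List.nil_append, pvMapHd_id]
  rw [pvFlatMap_singleton, List.map_map]
  exact List.map_congr_left (fun item _ => by
    simp [Function.comp, pvCleanB, pvRstrip_idem])
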